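-- pv_equiv track=rewrite | github.com/dcna-dev/intro-cc-02 | lista_exercicios_02/l2op_e2_ordem_lexicografica.py | primeiro_lex
-- ===== SOURCE A (Python) =====
-- def primeiro_lex(lista):
--
--     menor = 10000000
--     primeiro = ''
--     for i in range(len(lista)):
--             if ord(lista[i][0]) < menor:
--                 primeiro = lista[i]
--                 menor = ord(lista[i][0])
--     return primeiro
-- ===== SOURCE B (Python) =====
-- def primeiro_lex(lista):
--     if not lista:
--         return ''
--     return sorted(lista, key=lambda s: ord(s[0]))[0]
-- ===== Notes on version B (the rewrite author's own statement) =====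
-- stated objective: idiomatic
-- what changed: Replaces the manual sentinel-initialised index loop with a stable sort keyed on the first character and taking the head (stability preserves A's first-occurrence tie-breaking).
import Mathlib
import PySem

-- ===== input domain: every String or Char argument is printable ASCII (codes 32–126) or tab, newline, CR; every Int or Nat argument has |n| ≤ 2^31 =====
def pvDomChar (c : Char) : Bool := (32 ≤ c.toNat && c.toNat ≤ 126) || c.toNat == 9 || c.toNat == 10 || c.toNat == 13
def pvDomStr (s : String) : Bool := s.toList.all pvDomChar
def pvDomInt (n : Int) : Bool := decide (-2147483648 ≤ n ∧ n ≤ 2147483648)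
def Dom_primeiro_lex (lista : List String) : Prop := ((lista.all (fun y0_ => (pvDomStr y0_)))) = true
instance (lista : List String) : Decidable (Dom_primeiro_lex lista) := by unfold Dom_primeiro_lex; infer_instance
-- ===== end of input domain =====

-- B replaces the sentinel-initialised index loop with a stable sort on the first character's code, taking the head (idiomatic; stability keeps A's first-occurrence ties).


-- ===== PORT A =====
-- ord(lista[i][0]) : Pre_ guarantees every string is nonempty, so the headD default ' ' is never used
def primeiro_lex (lista : List String) : String :=
  ((PySem.List.pyRange 0 (PySem.List.len lista)).foldl
    (fun st i =>
      if (((PySem.List.pyGetD lista i "").toList.headD ' ').toNat : Int) < st.1 then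
        ((((PySem.List.pyGetD lista i "").toList.headD ' ').toNat : Int), PySem.List.pyGetD lista i "")
      else st)
    ((10000000 : Int), "")).2

-- ===== PORT B =====
-- key = lambda s: ord(s[0]); Pre_ guarantees nonempty strings, headD default unused
def pvBKey (s : String) : Int := ((s.toList.headD ' ').toNat : Int)

def primeiro_lex_alt (lista : List String) : String :=
  match lista with
  | [] => ""
  | _ :: _ => (PySem.List.sorted lista pvBKey).headD ""

-- ===== PRECONDITION & SPEC =====
-- Pre_ excludes lists containing an empty string: there A (and B) raise IndexError on s[0].
def Pre_primeiro_lex (lista : List String) : Prop := (lista.all (fun s => !s.isEmpty)) = true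
instance (lista : List String) : Decidable (Pre_primeiro_lex lista) := by unfold Pre_primeiro_lex; infer_instance

def pvWitness_primeiro_lex : List String := ["banana", "Abacaxi", "uva"]

def Spec_primeiro_lex (lista : List String) (out : String) : Prop := out = primeiro_lex_alt lista
instance (lista : List String) (out : String) : Decidable (Spec_primeiro_lex lista out) := by unfold Spec_primeiro_lex; infer_instance

-- ===== CLAIM (what is proved, stated in full; the proofs are below) =====
def Claim_equal_primeiro_lex : Prop := ∀ (lista : List String), Dom_primeiro_lex lista → Pre_primeiro_lex lista → Spec_primeiro_lex lista (primeiro_lex lista)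

-- ===== LEMMAS AND PROOFS =====

-- the one-value "first strict minimum" step both programs realise
def pvStep (cur x : String) : String := if pvBKey x < pvBKey cur then x else cur

-- head of insertBy: only the head comparison matters
lemma head_insertBy (before : String → String → Bool) (x h : String) (t : List String) :
    (PySem.List.insertBy before x (h :: t)).headD "" = if before x h then x else h := by
  by_cases hb : before x h = true <;> simp [PySem.List.insertBy, hb]

lemma insertBy_ne_nil (before : String → String → Bool) (x : String) (l : List String) :
    PySem.List.insertBy before x l ≠ [] := by
  cases l with
  | nil => simp [PySem.List.insertBy]
  | cons h t => by_cases hb : before x h = true <;> simp [PySem.List.insertBy, hb]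

-- head of the insertion-sort fold follows the firstMin recurrence
lemma head_foldl_insertBy (xs : List String) (acc : List String) (hacc : acc ≠ []) :
    ((xs.foldl (fun a x => PySem.List.insertBy (fun a b => decide (pvBKey a < pvBKey b)) x a) acc).headD "")
      = xs.foldl pvStep (acc.headD "") := by
  induction xs generalizing acc with
  | nil => rfl
  | cons x xs ih =>
    obtain ⟨h, t, rfl⟩ := List.exists_cons_of_ne_nil hacc
    rw [List.foldl_cons, ih _ (insertBy_ne_nil _ _ _), List.foldl_cons]
    congr 1
    rw [head_insertBy]
    by_cases hlt : pvBKey x < pvBKey h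
    · simp [pvStep, hlt]
    · simp [pvStep, hlt]

lemma sorted_head_eq_foldl (x : String) (xs : List String) :
    ((PySem.List.sorted (x :: xs) pvBKey).headD "") = xs.foldl pvStep x := by
  rw [PySem.List.sorted_eq_foldl_insertBy, List.foldl_cons]
  rw [head_foldl_insertBy xs _ (insertBy_ne_nil _ _ _)]
  simp [PySem.List.insertBy]

-- A's pair fold carries (pvBKey cur, cur); collapse it to the one-value fold
lemma pair_foldl_eq (xs : List String) (p : String) :
    (xs.foldl
      (fun st s =>
        if ((s.toList.headD ' ').toNat : Int) < st.1 then
          (((s.toList.headD ' ').toNat : Int), s)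
        else st)
      (pvBKey p, p)) = (pvBKey (xs.foldl pvStep p), xs.foldl pvStep p) := by
  induction xs generalizing p with
  | nil => rfl
  | cons x xs ih =>
    simp only [List.foldl_cons]
    by_cases h : pvBKey x < pvBKey p
    · have e : pvStep p x = x := by simp [pvStep, h]
      have h' : (((x.toList.headD ' ').toNat : Int)) < (pvBKey p, p).1 := h
      rw [if_pos h', e]
      exact ih x
    · have e : pvStep p x = p := by simp [pvStep, h]
      have h' : ¬ (((x.toList.headD ' ').toNat : Int)) < (pvBKey p, p).1 := h
      rw [if_neg h', e]
      exact ih p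

-- first character of a nonempty printable-ASCII string has code < 10000000
lemma key_lt_sentinel (s : String) (hs : pvDomStr s = true) (hne : (!s.isEmpty) = true) :
    pvBKey s < 10000000 := by
  unfold pvBKey
  cases hl : s.toList with
  | nil =>
    exfalso
    simp at hne
    rw [String.toList_eq_nil_iff] at hl
    rw [hl] at hne
    exact absurd hne (by decide)
  | cons c cs =>
    have hc : pvDomChar c = true := by
      unfold pvDomStr at hs
      rw [hl] at hs
      simp [List.all_cons] at hs
      exact hs.1
    unfold pvDomChar at hc
    simp at hc
    simp only [List.headD_cons]
    omega

-- ===== VERDICT (by name: the statement is the Claim_ definition above) =====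
theorem primeiro_lex_spec : Claim_equal_primeiro_lex := by
  intro lista hdom hpre
  unfold Spec_primeiro_lex primeiro_lex primeiro_lex_alt
  cases lista with
  | nil => rfl
  | cons x xs =>
    have hfold := PySem.List.foldl_pyRange_pyGetD (x :: xs) ""
      (fun st v =>
        if ((v.toList.headD ' ').toNat : Int) < st.1 then
          (((v.toList.headD ' ').toNat : Int), v)
        else st)
      ((10000000 : Int), "") (le_refl (0 : Int))
    beta_reduce at hfold
    rw [hfold]
    simp only [Int.toNat_zero, List.drop_zero, List.foldl_cons]
    have hx : pvBKey x < 10000000 := by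
      refine key_lt_sentinel x ?_ ?_
      · unfold Dom_primeiro_lex at hdom; simp [List.all_cons] at hdom; exact hdom.1
      · unfold Pre_primeiro_lex at hpre; simp [List.all_cons] at hpre
        simp [hpre.1]
    have h1 : ((x.toList.headD ' ').toNat : Int) < (10000000 : Int) := hx
    rw [if_pos h1]
    have := pair_foldl_eq xs x
    rw [show (((x.toList.headD ' ').toNat : Int), x) = (pvBKey x, x) from rfl, this]
    rw [sorted_head_eq_foldl]
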